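-- pv_equiv track=rewrite | github.com/yipeizhao/leetcode_solutions | 2285Maximum Total Importance of Roads.py | solution
-- ===== SOURCE A (Python) =====
-- def solution(n,roads):
--     connections = {}
--     res = 0
--     for i in range(n):
--         connections[i]=0
--     for item in roads:
--         connections[item[0]]+=1
--         connections[item[1]]+=1
--
--     importance = sorted(connections.items(), key=lambda kv:
--                  (kv[1], kv[0]))
--     importance = dict(zip([item[0] for item in importance],range(1,n+1)))
--     for item in roads:
--         res+=importance[item[0]]+importance[item[1]]
--
--     return res
-- ===== SOURCE B (Python) =====
-- def solution(n, roads):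
--     # rank nodes 1..n in (degree, node) order; total = sum of rank*degree per node
--     deg = dict.fromkeys(range(n), 0)
--     for v in (e for r in roads for e in r[:2]):
--         deg[v] += 1
--     ranked = sorted(deg.items(), key=lambda kv: (kv[1], kv[0]))
--     return sum(rank * d for rank, (_, d) in enumerate(ranked, 1))
-- ===== Notes on version B (the rewrite author's own statement) =====
-- stated objective: idiomatic
-- what changed: B drops A's rank dictionary and second per-edge loop: it counts degrees over the flattened endpoint list and computes the result in a single per-node pass as the sum of rank*degree over the (degree, node)-sorted nodes, using sum_edges(r[u]+r[v]) = sum_nodes rank*deg.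
import Mathlib
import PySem

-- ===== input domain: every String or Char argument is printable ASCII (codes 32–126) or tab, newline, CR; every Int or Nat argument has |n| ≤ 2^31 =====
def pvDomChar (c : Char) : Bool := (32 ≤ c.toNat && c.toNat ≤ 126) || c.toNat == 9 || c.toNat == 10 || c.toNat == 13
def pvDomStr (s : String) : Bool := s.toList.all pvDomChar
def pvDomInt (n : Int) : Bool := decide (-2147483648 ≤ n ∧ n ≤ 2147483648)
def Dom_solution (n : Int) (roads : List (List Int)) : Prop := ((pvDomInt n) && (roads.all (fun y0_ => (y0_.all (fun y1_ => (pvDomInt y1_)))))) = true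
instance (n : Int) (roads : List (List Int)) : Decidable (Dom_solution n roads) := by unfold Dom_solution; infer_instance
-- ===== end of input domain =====

-- B replaces A's rank dictionary and second per-edge loop by one per-node pass
-- (sum of rank * degree over the degree-sorted nodes); same cost, more idiomatic.

-- ===== PORT A =====
-- item[0]/item[1] are ported with pyGetD and dict accesses with modify/getD; Python raises
-- (IndexError/KeyError) exactly where these would take the default, and Pre_solution excludes those inputs.
def solution (n : Int) (roads : List (List Int)) : Int :=
  let connections : PySem.Dict Int Int :=
    (PySem.List.pyRange 0 n 1).foldl (fun d i => d.insert i 0) PySem.Dict.empty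
  let connections := roads.foldl (fun d item =>
    (d.modify (PySem.List.pyGetD item 0 0) 0 (· + 1)).modify
      (PySem.List.pyGetD item 1 0) 0 (· + 1)) connections
  let importance := PySem.List.sorted2 connections.items (fun kv => kv.2) (fun kv => kv.1) false
  let importance2 : PySem.Dict Int Int :=
    PySem.Dict.ofList ((importance.map (fun item => item.1)).zip (PySem.List.pyRange 1 (n + 1) 1))
  roads.foldl (fun res item =>
    res + importance2.getD (PySem.List.pyGetD item 0 0) 0
        + importance2.getD (PySem.List.pyGetD item 1 0) 0) 0

-- ===== PORT B =====
def solution_alt (n : Int) (roads : List (List Int)) : Int :=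
  let deg : PySem.Dict Int Int :=
    (PySem.List.pyRange 0 n 1).foldl (fun d i => d.insert i 0) PySem.Dict.empty
  let deg := (roads.flatMap (fun r => PySem.List.slice r none (some 2))).foldl
    (fun d v => d.modify v 0 (· + 1)) deg
  let ranked := PySem.List.sorted2 deg.items (fun kv => kv.2) (fun kv => kv.1) false
  ((PySem.List.enumerate ranked 1).map (fun p => p.1 * p.2.2)).sum

-- ===== PRECONDITION & SPEC =====
-- Pre_ excludes exactly the inputs where A raises: a road entry shorter than 2 (IndexError)
-- or an endpoint outside range(n) (KeyError); A returns on everything Pre_ admits.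
def Pre_solution (n : Int) (roads : List (List Int)) : Prop :=
  ∀ r ∈ roads, 2 ≤ r.length ∧ ∀ v ∈ r.take 2, 0 ≤ v ∧ v < n
instance (n : Int) (roads : List (List Int)) : Decidable (Pre_solution n roads) := by
  unfold Pre_solution; infer_instance
def pvWitness_solution : Int × List (List Int) := (3, [[0, 1], [1, 2], [1, 1]])

def Spec_solution (n : Int) (roads : List (List Int)) (out : Int) : Prop := out = solution_alt n roads
instance (n : Int) (roads : List (List Int)) (out : Int) : Decidable (Spec_solution n roads out) := by
  unfold Spec_solution; infer_instance

-- ===== CLAIM (what is proved, stated in full; the proofs are below) =====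
def Claim_equal_solution : Prop := ∀ (n : Int) (roads : List (List Int)),
  Dom_solution n roads → Pre_solution n roads → Spec_solution n roads (solution n roads)
-- ===== LEMMAS AND PROOFS =====

theorem take2_eq (a b : Int) (t : List Int) :
    PySem.List.slice (a::b::t) none (some 2) = [a, b] := by
  rw [PySem.List.slice_to (xs := a::b::t) (b := 2) (by norm_num)]; rfl

theorem pyGetD0 (a b : Int) (t : List Int) : PySem.List.pyGetD (a::b::t) 0 0 = a := by
  simp [PySem.List.pyGetD, PySem.List.pyGet?, PySem.List.pyIdx?,
    show (0:Int) ≤ (t.length:Int)+1 from by positivity]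
theorem pyGetD1 (a b : Int) (t : List Int) : PySem.List.pyGetD (a::b::t) 1 0 = b := by
  simp [PySem.List.pyGetD, PySem.List.pyGet?, PySem.List.pyIdx?]

theorem count_fold_eq (roads : List (List Int)) (d : PySem.Dict Int Int)
    (h : ∀ r ∈ roads, 2 ≤ r.length) :
    roads.foldl (fun d item =>
        (d.modify (PySem.List.pyGetD item 0 0) 0 (· + 1)).modify
          (PySem.List.pyGetD item 1 0) 0 (· + 1)) d
      = (roads.flatMap (fun r => PySem.List.slice r none (some 2))).foldl
          (fun d v => d.modify v 0 (· + 1)) d := by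
  induction roads generalizing d with
  | nil => rfl
  | cons r rs ih =>
    have h2 := h r (by simp)
    match r, h2 with
    | a :: b :: t, _ =>
      simp only [List.flatMap_cons, take2_eq, List.foldl_cons, List.foldl_append,
        List.foldl_nil, pyGetD0, pyGetD1]
      exact ih _ (fun r hr => h r (by simp [hr]))

theorem edge_fold_eq (roads : List (List Int)) (f : Int → Int) (acc : Int)
    (h : ∀ r ∈ roads, 2 ≤ r.length) :
    roads.foldl (fun res item =>
        res + f (PySem.List.pyGetD item 0 0) + f (PySem.List.pyGetD item 1 0)) acc
      = acc + ((roads.flatMap (fun r => PySem.List.slice r none (some 2))).map f).sum := by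
  induction roads generalizing acc with
  | nil => simp
  | cons r rs ih =>
    have h2 := h r (by simp)
    match r, h2 with
    | a :: b :: t, _ =>
      simp only [List.flatMap_cons, take2_eq, List.foldl_cons, List.map_append, List.map_cons,
        List.map_nil, List.sum_append, List.sum_cons, List.sum_nil, pyGetD0, pyGetD1]
      rw [ih _ (fun r hr => h r (by simp [hr]))]
      ring

theorem sum_ite_single (keys : List Int) (f : Int → Int) (v : Int)
    (hnd : keys.Nodup) (hv : v ∈ keys) :
    (keys.map (fun k => if k = v then f k else 0)).sum = f v := by
  induction keys with
  | nil => cases hv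
  | cons k ks ih =>
    simp only [List.map_cons, List.sum_cons]
    rcases List.mem_cons.mp hv with h1 | hv'
    · subst h1
      have hz : ∀ x ∈ ks, (if x = v then f x else 0) = 0 := by
        intro x hx
        have : x ≠ v := fun h => (List.nodup_cons.mp hnd).1 (h ▸ hx)
        simp [this]
      rw [if_pos rfl, List.sum_eq_zero (by simpa using hz)]
      ring
    · have hk : k ≠ v := fun h => (List.nodup_cons.mp hnd).1 (h ▸ hv')
      rw [if_neg hk, ih (List.nodup_cons.mp hnd).2 hv']
      ring

theorem sum_map_eq_sum_count (ends keys : List Int) (f : Int → Int)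
    (hnd : keys.Nodup) (hsub : ∀ v ∈ ends, v ∈ keys) :
    (ends.map f).sum = (keys.map (fun k => f k * (ends.count k : Int))).sum := by
  induction ends with
  | nil => simp
  | cons v es ih =>
    have step : ∀ k : Int, f k * (((v :: es).count k : Nat) : Int)
        = f k * ((es.count k : Nat) : Int) + (if k = v then f k else 0) := by
      intro k
      simp only [List.count_cons, beq_iff_eq]
      by_cases hk : k = v
      · subst hk
        rw [if_pos rfl, if_pos rfl]
        push_cast; ring
      · rw [if_neg (fun h => hk h.symm), if_neg hk]
        push_cast; ring
    calc ((v :: es).map f).sum = f v + (es.map f).sum := by simp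
      _ = (keys.map (fun k => f k * (es.count k : Int))).sum
            + (keys.map (fun k => if k = v then f k else 0)).sum := by
            rw [ih (fun x hx => hsub x (by simp [hx])), sum_ite_single keys f v hnd (hsub v (by simp))]
            ring
      _ = (keys.map (fun k => f k * ((v :: es).count k : Int))).sum := by
            rw [← List.sum_map_add]
            congr 1
            exact List.map_congr_left (fun k _ => (step k).symm)

theorem rank_sum_eq (ranked : List (Int × Int)) (f : Int → Int) (s : Int)
    (h : ∀ (i : Nat) (hi : i < ranked.length), f (ranked[i].1) = s + i) :
    (ranked.map (fun p => f p.1 * p.2)).sum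
      = ((PySem.List.enumerate ranked s).map (fun p => p.1 * p.2.2)).sum := by
  induction ranked generalizing s with
  | nil => simp [PySem.List.enumerate_nil]
  | cons p t ih =>
    rw [PySem.List.enumerate_cons]
    simp only [List.map_cons, List.sum_cons]
    have h0 : f p.1 = s := by simpa using h 0 (by simp)
    rw [h0, ih (s + 1) (fun i hi => by simpa [add_assoc, add_comm, add_left_comm] using h (i+1) (by simpa using hi))]

theorem zip_rank_lookup (ranked : List (Int × Int)) (n : Int)
    (hlen : ranked.length = n.toNat) (hnd : (ranked.map Prod.fst).Nodup)
    (i : Nat) (hi : i < ranked.length) :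
    (PySem.Dict.ofList ((ranked.map (fun item => item.1)).zip
        (PySem.List.pyRange 1 (n + 1) 1))).getD (ranked[i].1) 0 = 1 + i := by
  set pairs := (ranked.map (fun item => item.1)).zip (PySem.List.pyRange 1 (n + 1) 1) with hp
  have hrlen : (PySem.List.pyRange 1 (n + 1) 1).length = n.toNat := by
    rw [PySem.List.length_pyRange_one]; omega
  have hfst : pairs.map Prod.fst = ranked.map (fun item => item.1) := by
    apply List.map_fst_zip
    simp [hrlen, hlen]
  have hfstnodup : (pairs.map Prod.fst).Nodup := by rw [hfst]; exact hnd
  have hitems : (PySem.Dict.ofList pairs).items = pairs := by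
    have h := PySem.Dict.items_foldl_insert_fresh pairs Prod.fst Prod.snd PySem.Dict.empty
      (fun a _ => PySem.Dict.contains_empty _) hfstnodup
    simpa [PySem.Dict.ofList, PySem.Dict.update] using h
  have hkeys : (PySem.Dict.ofList pairs).keys.Nodup := by
    simpa [PySem.Dict.keys, hitems] using hfstnodup
  have hmem : (ranked[i].1, (1 + (i : Int))) ∈ pairs := by
    rw [hp]
    refine List.mem_iff_getElem.mpr ⟨i, by simp [List.length_zip, hrlen, hlen]; omega, ?_⟩
    rw [List.getElem_zip]
    congr 1
    · simp
    · rw [PySem.List.getElem_pyRange_one]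
  have hmem' : (ranked[i].1, (1 + (i : Int))) ∈ (PySem.Dict.ofList pairs).items := by
    rw [hitems]; exact hmem
  exact PySem.Dict.getD_of_mem_items _ hmem' hkeys 0

-- ===== VERDICT (by name: the statement is the Claim_ definition above) =====
theorem solution_spec : Claim_equal_solution := by
  intro n roads _ hpre
  unfold Spec_solution solution solution_alt
  dsimp only []
  have hlen2 : ∀ r ∈ roads, 2 ≤ r.length := fun r hr => (hpre r hr).1
  rw [count_fold_eq roads _ hlen2]
  set Z : PySem.Dict Int Int :=
    (PySem.List.pyRange 0 n 1).foldl (fun d i => d.insert i 0) PySem.Dict.empty with hZ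
  set ends := roads.flatMap (fun r => PySem.List.slice r none (some 2)) with hends
  set deg := ends.foldl (fun d v => d.modify v 0 (· + 1)) Z with hdeg
  set ranked := PySem.List.sorted2 deg.items (fun kv => kv.2) (fun kv => kv.1) false with hranked
  set imp := PySem.Dict.ofList ((ranked.map (fun item => item.1)).zip
    (PySem.List.pyRange 1 (n + 1) 1)) with himp
  -- facts about the zero dict Z
  have hZitems : Z.items = (PySem.List.pyRange 0 n 1).map (fun i => (i, (0:Int))) := by
    have h := PySem.Dict.items_foldl_insert_fresh (PySem.List.pyRange 0 n 1)
      (fun i => i) (fun _ => (0:Int)) PySem.Dict.empty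
      (fun a _ => PySem.Dict.contains_empty _) (by simpa using PySem.List.nodup_pyRange_one 0 n)
    simpa using h
  have hZkeys : Z.keys = PySem.List.pyRange 0 n 1 := by
    rw [PySem.Dict.keys, hZitems, List.map_map]
    simp [Function.comp_def]
  have hZnodup : Z.keys.Nodup := by
    rw [hZkeys]; exact PySem.List.nodup_pyRange_one 0 n
  have hZgetD : ∀ k ∈ PySem.List.pyRange 0 n 1, Z.getD k 0 = 0 := by
    intro k hk
    exact PySem.Dict.getD_of_mem_items Z (by rw [hZitems]; exact List.mem_map_of_mem hk) hZnodup 0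
  -- every flattened endpoint is a node of range(n)
  have hsub : ∀ v ∈ ends, v ∈ PySem.List.pyRange 0 n 1 := by
    intro v hv
    rw [hends] at hv
    obtain ⟨r, hr, hvr⟩ := List.mem_flatMap.mp hv
    rw [PySem.List.slice_to (xs := r) (b := 2) (by norm_num)] at hvr
    have := (hpre r hr).2 v (by simpa using hvr)
    exact PySem.List.mem_pyRange_one.mpr ⟨this.1, this.2⟩
  -- the degree dict: keys are range(n), values the endpoint multiplicities
  have hdegkeys : deg.keys = PySem.List.pyRange 0 n 1 := by
    rw [hdeg, PySem.Dict.keys_foldl_modify ends 0 (fun _ _ => (· + 1)) Z,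
      PySem.Set.update_eq_append_filter, hZkeys]
    have hfe : ∀ y ∈ PySem.Set.ofList ends, ¬(!PySem.Set.contains (PySem.List.pyRange 0 n 1) y) = true := by
      intro y hy
      have hy' : y ∈ ends := (PySem.Set.mem_ofList ends y).mp hy
      simp [PySem.Set.contains_eq_listContains, List.contains_eq_mem, hsub y hy']
    rw [List.filter_eq_nil_iff.mpr hfe, List.append_nil]
  have hdegnodup : deg.keys.Nodup := by rw [hdegkeys]; exact PySem.List.nodup_pyRange_one 0 n
  have hdeggetD : ∀ k ∈ PySem.List.pyRange 0 n 1, deg.getD k 0 = (ends.count k : Int) := by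
    intro k hk
    rw [hdeg, PySem.Dict.getD_foldl_modify_add_one, hZgetD k hk, zero_add]
  have hdegitems : deg.items = (PySem.List.pyRange 0 n 1).map (fun k => (k, (ends.count k : Int))) := by
    rw [PySem.Dict.items_eq_map_keys deg hdegnodup 0, hdegkeys]
    exact List.map_congr_left (fun k hk => by rw [hdeggetD k hk])
  -- the sorted node list
  have hperm : ranked.Perm deg.items :=
    PySem.List.sorted2_perm deg.items (fun kv => kv.2) (fun kv => kv.1) false
  have hrlen : ranked.length = n.toNat := by
    rw [hperm.length_eq, hdegitems, List.length_map, PySem.List.length_pyRange_one]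
    omega
  have hrnodup : (ranked.map Prod.fst).Nodup := by
    have hitemsnodup : (deg.items.map Prod.fst).Nodup := by
      rw [hdegitems, List.map_map]
      simpa [Function.comp_def] using PySem.List.nodup_pyRange_one 0 n
    exact ((hperm.map Prod.fst).symm).nodup hitemsnodup
  have hrank : ∀ (i : Nat) (hi : i < ranked.length),
      imp.getD (ranked[i].1) 0 = 1 + (i : Int) := by
    intro i hi
    exact zip_rank_lookup ranked n hrlen hrnodup i hi
  -- assemble
  rw [edge_fold_eq roads (fun v => imp.getD v 0) 0 hlen2, zero_add, ← hends]
  have e1 := sum_map_eq_sum_count ends (PySem.List.pyRange 0 n 1) (fun v => imp.getD v 0)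
          (PySem.List.nodup_pyRange_one 0 n) hsub
  have e2 : ((PySem.List.pyRange 0 n 1).map
          (fun k => imp.getD k 0 * (ends.count k : Int))).sum
      = (deg.items.map (fun p => imp.getD p.1 0 * p.2)).sum := by
        rw [hdegitems, List.map_map]
        rfl
  have e3 := ((hperm.map (fun p => imp.getD p.1 0 * p.2)).sum_eq).symm
  have e4 := rank_sum_eq ranked (fun v => imp.getD v 0) 1 hrank
  rw [e1, e2, e3, e4]
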